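-- pv_equiv track=rewrite | github.com/michaelrolphone-cmyk/book-writer | book_writer/writer.py | _escape_latex_line_outside_math
-- ===== SOURCE A (Python) =====
-- def _escape_latex_line_outside_math(line: str) -> str:
--     result: list[str] = []
--     index = 0
--     while index < len(line):
--         if line[index] == "`":
--             closing = line.find("`", index + 1)
--             if closing != -1:
--                 result.append(line[index : closing + 1])
--                 index = closing + 1
--                 continue
--         if line.startswith("$$", index):
--             closing = line.find("$$", index + 2)
--             if closing != -1:
--                 result.append(line[index : closing + 2])
--                 index = closing + 2
--                 continue
--             result.append("\\$\\$")
--             index += 2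
--             continue
--         if line[index] == "$":
--             closing = line.find("$", index + 1)
--             if closing != -1:
--                 result.append(line[index : closing + 1])
--                 index = closing + 1
--                 continue
--             result.append("\\$")
--             index += 1
--             continue
--         if line.startswith("\\(", index):
--             closing = line.find("\\)", index + 2)
--             if closing != -1:
--                 result.append(line[index : closing + 2])
--                 index = closing + 2
--                 continue
--         if line.startswith("\\[", index):
--             closing = line.find("\\]", index + 2)
--             if closing != -1:
--                 result.append(line[index : closing + 2])
--                 index = closing + 2
--                 continue
--         if line[index] == "\\":
--             result.append("\\textbackslash{}")
--             index += 1
--             continue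
--         result.append(line[index])
--         index += 1
--     return "".join(result)
-- ===== SOURCE B (Python) =====
-- def _escape_latex_line_outside_math(line: str) -> str:
--     n = len(line)
--
--     def next_table(pat):
--         # nxt[j] = smallest index k >= j where pat occurs, else the sentinel n
--         nxt = [n] * (n + 1)
--         for j in range(n - 1, -1, -1):
--             nxt[j] = j if line.startswith(pat, j) else nxt[j + 1]
--         return nxt
--
--     n_bt = next_table("`")
--     n_dd = next_table("$$")
--     n_d = next_table("$")
--     n_cp = next_table("\\)")
--     n_cb = next_table("\\]")
--
--     out = []
--     i = 0
--     while i < n: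
--         c = line[i]
--         if c == "`":
--             j = n_bt[i + 1]
--             if j < n:
--                 out.append(line[i : j + 1]); i = j + 1
--             else:
--                 out.append("`"); i += 1
--         elif c == "$":
--             if i + 1 < n and line[i + 1] == "$":
--                 j = n_dd[i + 2]
--                 if j < n:
--                     out.append(line[i : j + 2]); i = j + 2
--                 else:
--                     out.append("\\$\\$"); i += 2
--             else:
--                 j = n_d[i + 1]
--                 if j < n:
--                     out.append(line[i : j + 1]); i = j + 1
--                 else:
--                     out.append("\\$"); i += 1
--         elif c == "\\":
--             if i + 1 < n and line[i + 1] == "(" and n_cp[i + 2] < n: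
--                 j = n_cp[i + 2]
--                 out.append(line[i : j + 2]); i = j + 2
--             elif i + 1 < n and line[i + 1] == "[" and n_cb[i + 2] < n:
--                 j = n_cb[i + 2]
--                 out.append(line[i : j + 2]); i = j + 2
--             else:
--                 out.append("\\textbackslash{}"); i += 1
--         else:
--             out.append(c); i += 1
--     return "".join(out)
-- ===== Notes on version B (the rewrite author's own statement) =====
-- stated objective: alternative
-- what changed: A rescans with str.find at every delimiter (quadratic worst case); B precomputes a next-occurrence table per delimiter in one backward pass and the main loop dispatches on the head character with table lookups instead of find calls, removing all rescans (O(n) worst case).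
import Mathlib
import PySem

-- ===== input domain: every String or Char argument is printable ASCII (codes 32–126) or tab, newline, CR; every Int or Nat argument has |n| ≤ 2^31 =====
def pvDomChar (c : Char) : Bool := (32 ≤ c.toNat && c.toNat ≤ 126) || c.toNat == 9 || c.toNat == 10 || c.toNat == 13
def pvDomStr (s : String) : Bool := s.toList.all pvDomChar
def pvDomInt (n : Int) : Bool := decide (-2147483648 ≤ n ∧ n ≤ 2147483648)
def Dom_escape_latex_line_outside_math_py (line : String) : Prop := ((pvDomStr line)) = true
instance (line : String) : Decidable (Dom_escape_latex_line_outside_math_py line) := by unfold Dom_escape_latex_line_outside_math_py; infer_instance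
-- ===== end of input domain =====

-- B replaces A's repeated str.find rescans by next-occurrence tables built in one backward
-- pass and a fall-through-free dispatch on the head character (objective: alternative;
-- asymptotically better worst case, not measurably faster on typical lines).

-- ===== PORT A =====
-- A's loop body is a fall-through chain of 'if … continue' blocks; each pvAstepK below is
-- one block, falling through to the next. Each returns (appended piece, next index).
-- line.startswith(p, i) with 0 ≤ i ≤ len(line) is exactly Chars.startswith (l.drop i) p.

-- block 6: '\' → r'\textbackslash{}', else the literal character
def pvAstep6 (l : List Char) (i : Nat) : List Char × Nat :=
  if l.getD i ' ' = '\\' then ("\\textbackslash{}".toList, i + 1)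
  else ([l.getD i ' '], i + 1)

-- block 5: '\[' with a closing '\]'
def pvAstep5 (l : List Char) (i : Nat) : List Char × Nat :=
  if PySem.Chars.startswith (l.drop i) ['\\', '['] then
    let closing := PySem.Chars.findFrom l ['\\', ']'] ((i + 2 : Nat) : Int) none
    if closing ≠ -1 then
      (PySem.Chars.slice l (some (i : Int)) (some (closing + 2)), closing.toNat + 2)
    else pvAstep6 l i
  else pvAstep6 l i

-- block 4: '\(' with a closing '\)'
def pvAstep4 (l : List Char) (i : Nat) : List Char × Nat :=
  if PySem.Chars.startswith (l.drop i) ['\\', '('] then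
    let closing := PySem.Chars.findFrom l ['\\', ')'] ((i + 2 : Nat) : Int) none
    if closing ≠ -1 then
      (PySem.Chars.slice l (some (i : Int)) (some (closing + 2)), closing.toNat + 2)
    else pvAstep5 l i
  else pvAstep5 l i

-- block 3: single '$'
def pvAstep3 (l : List Char) (i : Nat) : List Char × Nat :=
  if l.getD i ' ' = '$' then
    let closing := PySem.Chars.findFrom l ['$'] ((i + 1 : Nat) : Int) none
    if closing ≠ -1 then
      (PySem.Chars.slice l (some (i : Int)) (some (closing + 1)), closing.toNat + 1)
    else (['\\', '$'], i + 1)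
  else pvAstep4 l i

-- block 2: '$$'
def pvAstep2 (l : List Char) (i : Nat) : List Char × Nat :=
  if PySem.Chars.startswith (l.drop i) ['$', '$'] then
    let closing := PySem.Chars.findFrom l ['$', '$'] ((i + 2 : Nat) : Int) none
    if closing ≠ -1 then
      (PySem.Chars.slice l (some (i : Int)) (some (closing + 2)), closing.toNat + 2)
    else (['\\', '$', '\\', '$'], i + 2)
  else pvAstep3 l i

-- block 1: '`'
def pvAstep1 (l : List Char) (i : Nat) : List Char × Nat :=
  if l.getD i ' ' = '`' then
    let closing := PySem.Chars.findFrom l ['`'] ((i + 1 : Nat) : Int) none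
    if closing ≠ -1 then
      (PySem.Chars.slice l (some (i : Int)) (some (closing + 1)), closing.toNat + 1)
    else pvAstep2 l i
  else pvAstep2 l i


-- the step functions always advance the index (termination of the while loop)
theorem pvAstep6_gt (l : List Char) (i : Nat) : i < (pvAstep6 l i).2 := by
  unfold pvAstep6; split <;> simp

theorem pvAstep5_gt (l : List Char) (i : Nat) (h : i < l.length) : i < (pvAstep5 l i).2 := by
  unfold pvAstep5
  simp only
  split
  · next hs =>
    have hle : i + 2 ≤ l.length := by
      have := ((PySem.Chars.startswith_iff _ _).mp hs).length_le
      simp [List.length_drop] at this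
      omega
    split
    · next hne =>
      obtain ⟨ha, -, -⟩ := PySem.Chars.findFrom_natCast_spec l ['\\', ']'] (i + 2) hle hne
      simp only
      omega
    · exact pvAstep6_gt l i
  · exact pvAstep6_gt l i

theorem pvAstep4_gt (l : List Char) (i : Nat) (h : i < l.length) : i < (pvAstep4 l i).2 := by
  unfold pvAstep4
  simp only
  split
  · next hs =>
    have hle : i + 2 ≤ l.length := by
      have := ((PySem.Chars.startswith_iff _ _).mp hs).length_le
      simp [List.length_drop] at this
      omega
    split
    · next hne =>
      obtain ⟨ha, -, -⟩ := PySem.Chars.findFrom_natCast_spec l ['\\', ')'] (i + 2) hle hne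
      simp only
      omega
    · exact pvAstep5_gt l i h
  · exact pvAstep5_gt l i h

theorem pvAstep3_gt (l : List Char) (i : Nat) (h : i < l.length) : i < (pvAstep3 l i).2 := by
  unfold pvAstep3
  simp only
  split
  · split
    · next hne =>
      obtain ⟨ha, -, -⟩ := PySem.Chars.findFrom_natCast_spec l ['$'] (i + 1) (by omega) hne
      simp only
      omega
    · simp
  · exact pvAstep4_gt l i h

theorem pvAstep2_gt (l : List Char) (i : Nat) (h : i < l.length) : i < (pvAstep2 l i).2 := by
  unfold pvAstep2
  simp only
  split
  · next hs =>
    have hle : i + 2 ≤ l.length := by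
      have := ((PySem.Chars.startswith_iff _ _).mp hs).length_le
      simp [List.length_drop] at this
      omega
    split
    · next hne =>
      obtain ⟨ha, -, -⟩ := PySem.Chars.findFrom_natCast_spec l ['$', '$'] (i + 2) hle hne
      simp only
      omega
    · simp
  · exact pvAstep3_gt l i h

theorem pvAstep1_gt (l : List Char) (i : Nat) (h : i < l.length) : i < (pvAstep1 l i).2 := by
  unfold pvAstep1
  simp only
  split
  · split
    · next hne =>
      obtain ⟨ha, -, -⟩ := PySem.Chars.findFrom_natCast_spec l ['`'] (i + 1) (by omega) hne
      simp only
      omega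
    · exact pvAstep2_gt l i h
  · exact pvAstep2_gt l i h

def pvAloop (l : List Char) (i : Nat) (acc : List (List Char)) : List (List Char) :=
  if h : i < l.length then
    pvAloop l (pvAstep1 l i).2 (acc ++ [(pvAstep1 l i).1])
  else acc
termination_by l.length - i
decreasing_by
  have := pvAstep1_gt l i h
  omega

def escape_latex_line_outside_math_py (line : String) : String :=
  String.ofList (PySem.Chars.join [] (pvAloop line.toList 0 []))

-- ===== PORT B =====
-- next_table(pat): nxt[j] = smallest k ≥ j with pat at k, else the sentinel n = len(line);
-- built right-to-left exactly as B's backward loop fills the array: entry j is j on a match,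
-- else the already-computed entry j+1 (= head of the rest of the table).
def pvBtableFrom (l pat : List Char) (j : Nat) : List Nat :=
  if _h : j < l.length then
    let rest := pvBtableFrom l pat (j + 1)
    (if PySem.Chars.startswith (l.drop j) pat then j else rest.headD l.length) :: rest
  else [l.length]
termination_by l.length - j

def pvBtable (l pat : List Char) : List Nat := pvBtableFrom l pat 0

-- every table entry is ≥ its own index or the sentinel (needed for termination of B's loop)
theorem pvBtableFrom_getD_ge (l pat : List Char) (j k : Nat) :
    j + k ≤ (pvBtableFrom l pat j).getD k l.length ∨
      (pvBtableFrom l pat j).getD k l.length = l.length := by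
  suffices H : ∀ m j k, l.length - j ≤ m →
      (j + k ≤ (pvBtableFrom l pat j).getD k l.length ∨
        (pvBtableFrom l pat j).getD k l.length = l.length) from H l.length j k (by omega)
  intro m
  induction m with
  | zero =>
    intro j k hm
    rw [pvBtableFrom, dif_neg (by omega)]
    right; cases k <;> rfl
  | succ m ih =>
    intro j k hm
    by_cases hjl : j < l.length
    · rw [pvBtableFrom, dif_pos hjl]
      simp only
      cases k with
      | zero =>
        rw [List.getD_cons_zero]
        split
        · left; omega
        · have hh : (pvBtableFrom l pat (j + 1)).headD l.length =
              (pvBtableFrom l pat (j + 1)).getD 0 l.length := by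
            cases (pvBtableFrom l pat (j + 1)) <;> rfl
          rw [hh]
          rcases ih (j + 1) 0 (by omega) with h | h
          · left; omega
          · right; exact h
      | succ k' =>
        rw [List.getD_cons_succ]
        rcases ih (j + 1) k' (by omega) with h | h
        · left; omega
        · right; exact h
    · rw [pvBtableFrom, dif_neg hjl]
      right; cases k <;> rfl

theorem pvBtable_getD_ge (l pat : List Char) (k : Nat) :
    k ≤ (pvBtable l pat).getD k l.length ∨ (pvBtable l pat).getD k l.length = l.length := by
  have := pvBtableFrom_getD_ge l pat 0 k
  simpa [pvBtable] using this

-- table soundness (values ≥ their index or the sentinel); only the termination proof uses it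
def pvTabOK (l : List Char) (t : List Nat) : Prop :=
  ∀ k, k ≤ t.getD k l.length ∨ t.getD k l.length = l.length

theorem pvBtable_tabOK (l pat : List Char) : pvTabOK l (pvBtable l pat) :=
  fun k => pvBtable_getD_ge l pat k

def pvBloop (l : List Char) (nbt ndd nd ncp ncb : List Nat)
    (h1 : pvTabOK l nbt) (h2 : pvTabOK l ndd) (h3 : pvTabOK l nd)
    (h4 : pvTabOK l ncp) (h5 : pvTabOK l ncb) (i : Nat)
    (acc : List (List Char)) : List (List Char) :=
  if h : i < l.length then
    let c := l.getD i ' '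
    if c = '`' then
      let j := nbt.getD (i + 1) l.length
      if _hj : j < l.length then
        pvBloop l nbt ndd nd ncp ncb h1 h2 h3 h4 h5 (j + 1)
          (acc ++ [PySem.Chars.slice l (some (i : Int)) (some ((j : Int) + 1))])
      else pvBloop l nbt ndd nd ncp ncb h1 h2 h3 h4 h5 (i + 1) (acc ++ [['`']])
    else if c = '$' then
      if i + 1 < l.length ∧ l.getD (i + 1) ' ' = '$' then
        let j := ndd.getD (i + 2) l.length
        if _hj : j < l.length then
          pvBloop l nbt ndd nd ncp ncb h1 h2 h3 h4 h5 (j + 2)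
            (acc ++ [PySem.Chars.slice l (some (i : Int)) (some ((j : Int) + 2))])
        else pvBloop l nbt ndd nd ncp ncb h1 h2 h3 h4 h5 (i + 2) (acc ++ [['\\', '$', '\\', '$']])
      else
        let j := nd.getD (i + 1) l.length
        if _hj : j < l.length then
          pvBloop l nbt ndd nd ncp ncb h1 h2 h3 h4 h5 (j + 1)
            (acc ++ [PySem.Chars.slice l (some (i : Int)) (some ((j : Int) + 1))])
        else pvBloop l nbt ndd nd ncp ncb h1 h2 h3 h4 h5 (i + 1) (acc ++ [['\\', '$']])
    else if c = '\\' then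
      if _hp : i + 1 < l.length ∧ l.getD (i + 1) ' ' = '(' ∧ ncp.getD (i + 2) l.length < l.length then
        let j := ncp.getD (i + 2) l.length
        pvBloop l nbt ndd nd ncp ncb h1 h2 h3 h4 h5 (j + 2)
          (acc ++ [PySem.Chars.slice l (some (i : Int)) (some ((j : Int) + 2))])
      else if _hb : i + 1 < l.length ∧ l.getD (i + 1) ' ' = '[' ∧ ncb.getD (i + 2) l.length < l.length then
        let j := ncb.getD (i + 2) l.length
        pvBloop l nbt ndd nd ncp ncb h1 h2 h3 h4 h5 (j + 2)
          (acc ++ [PySem.Chars.slice l (some (i : Int)) (some ((j : Int) + 2))])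
      else pvBloop l nbt ndd nd ncp ncb h1 h2 h3 h4 h5 (i + 1) (acc ++ ["\\textbackslash{}".toList])
    else pvBloop l nbt ndd nd ncp ncb h1 h2 h3 h4 h5 (i + 1) (acc ++ [[c]])
  else acc
termination_by l.length - i
decreasing_by
  · rcases h1 (i + 1) with hk | hk <;> omega
  · omega
  · rcases h2 (i + 2) with hk | hk <;> omega
  · omega
  · rcases h3 (i + 1) with hk | hk <;> omega
  · omega
  · rcases h4 (i + 2) with hk | hk <;> omega
  · rcases h5 (i + 2) with hk | hk <;> omega
  · omega
  · omega

def escape_latex_line_outside_math_py_alt (line : String) : String :=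
  let l := line.toList
  String.ofList (PySem.Chars.join []
    (pvBloop l (pvBtable l ['`']) (pvBtable l ['$', '$']) (pvBtable l ['$'])
      (pvBtable l ['\\', ')']) (pvBtable l ['\\', ']'])
      (pvBtable_tabOK l ['`']) (pvBtable_tabOK l ['$', '$']) (pvBtable_tabOK l ['$'])
      (pvBtable_tabOK l ['\\', ')']) (pvBtable_tabOK l ['\\', ']']) 0 []))

-- ===== PRECONDITION & SPEC =====
def Spec_escape_latex_line_outside_math_py (line : String) (out : String) : Prop := out = escape_latex_line_outside_math_py_alt line
instance (line : String) (out : String) : Decidable (Spec_escape_latex_line_outside_math_py line out) := by unfold Spec_escape_latex_line_outside_math_py; infer_instance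

-- ===== CLAIM (what is proved, stated in full; the proofs are below) =====
def Claim_equal_escape_latex_line_outside_math_py : Prop := ∀ (line : String), Dom_escape_latex_line_outside_math_py line → Spec_escape_latex_line_outside_math_py line (escape_latex_line_outside_math_py line)

-- ===== LEMMAS AND PROOFS =====

-- reference form of the tables: pvNext l pat i = least k ≥ i with pat a prefix of l.drop k, else l.length
def pvNext (l pat : List Char) (i : Nat) : Nat :=
  if _h : i < l.length then
    if pat.isPrefixOf (l.drop i) then i else pvNext l pat (i + 1)
  else l.length
termination_by l.length - i

theorem pvNext_le (l pat : List Char) (i : Nat) : pvNext l pat i ≤ l.length := by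
  suffices H : ∀ m i, l.length - i ≤ m → pvNext l pat i ≤ l.length from H l.length i (by omega)
  intro m
  induction m with
  | zero => intro i hm; rw [pvNext, dif_neg (by omega)]
  | succ m ih =>
    intro i hm
    rw [pvNext]
    split
    · split
      · omega
      · exact ih (i + 1) (by omega)
    · omega

theorem pvBtableFrom_getD_eq (l pat : List Char) (j i : Nat) (hj : j ≤ i) (hi : i ≤ l.length) :
    (pvBtableFrom l pat j).getD (i - j) l.length = pvNext l pat i := by
  suffices H : ∀ m j i, l.length - j ≤ m → j ≤ i → i ≤ l.length →
      (pvBtableFrom l pat j).getD (i - j) l.length = pvNext l pat i from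
    H l.length j i (by omega) hj hi
  intro m
  induction m with
  | zero =>
    intro j i hm hj hi
    have hij : i = j := by omega
    subst hij
    rw [pvBtableFrom, dif_neg (by omega), Nat.sub_self, List.getD_cons_zero,
      pvNext, dif_neg (by omega)]
  | succ m ih =>
    intro j i hm hj hi
    by_cases hjl : j < l.length
    · rw [pvBtableFrom, dif_pos hjl]
      simp only
      by_cases hij : i = j
      · subst hij
        rw [Nat.sub_self, List.getD_cons_zero, pvNext, dif_pos hjl]
        by_cases hs : PySem.Chars.startswith (List.drop i l) pat = true
        · rw [if_pos hs,
            if_pos (List.isPrefixOf_iff_prefix.mpr ((PySem.Chars.startswith_iff _ _).mp hs))]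
        · rw [if_neg hs, if_neg (by
            intro hc
            exact hs ((PySem.Chars.startswith_iff _ _).mpr (List.isPrefixOf_iff_prefix.mp hc)))]
          have hh : (pvBtableFrom l pat (i + 1)).headD l.length =
              (pvBtableFrom l pat (i + 1)).getD 0 l.length := by
            cases (pvBtableFrom l pat (i + 1)) <;> rfl
          rw [hh]
          have := ih (i + 1) (i + 1) (by omega) (by omega) (by omega)
          simpa using this
      · have hstep : i - j = (i - (j + 1)) + 1 := by omega
        rw [hstep, List.getD_cons_succ]
        exact ih (j + 1) i (by omega) (by omega) hi
    · have hij : i = j := by omega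
      subst hij
      rw [pvBtableFrom, dif_neg hjl, Nat.sub_self, List.getD_cons_zero,
        pvNext, dif_neg hjl]

theorem pvBtable_getD_eq (l pat : List Char) (i : Nat) (hi : i ≤ l.length) :
    (pvBtable l pat).getD i l.length = pvNext l pat i := by
  simpa [pvBtable] using pvBtableFrom_getD_eq l pat 0 i (Nat.zero_le _) hi

theorem pvNext_eq_len (l pat : List Char) (i : Nat)
    (h : ∀ k, i ≤ k → ¬ pat <+: l.drop k) : pvNext l pat i = l.length := by
  suffices H : ∀ m i, l.length - i ≤ m → (∀ k, i ≤ k → ¬ pat <+: l.drop k) →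
      pvNext l pat i = l.length from H l.length i (by omega) h
  intro m
  induction m with
  | zero => intro i hm _; rw [pvNext, dif_neg (by omega)]
  | succ m ih =>
    intro i hm h
    rw [pvNext]
    split
    · rw [if_neg (by
        intro hc
        exact h i le_rfl (List.isPrefixOf_iff_prefix.mp hc))]
      exact ih (i + 1) (by omega) (fun k hk => h k (by omega))
    · rfl

theorem pvNext_eq_of (l pat : List Char) (i j : Nat) (hij : i ≤ j)
    (hpref : pat <+: l.drop j) (hmin : ∀ k, i ≤ k → k < j → ¬ pat <+: l.drop k)
    (hp : pat ≠ []) : pvNext l pat i = j := by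
  have hjn : j < l.length := by
    by_contra hc
    have : l.drop j = [] := List.drop_eq_nil_of_le (by omega)
    rw [this] at hpref
    exact hp (List.prefix_nil.mp hpref)
  suffices H : ∀ m i, j - i ≤ m → i ≤ j → (∀ k, i ≤ k → k < j → ¬ pat <+: l.drop k) →
      pvNext l pat i = j from H j i (by omega) hij hmin
  intro m
  induction m with
  | zero =>
    intro i hm hij hmin
    have : i = j := by omega
    subst this
    rw [pvNext, dif_pos hjn, if_pos (List.isPrefixOf_iff_prefix.mpr hpref)]
  | succ m ih =>
    intro i hm hij hmin
    by_cases hieq : i = j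
    · subst hieq
      rw [pvNext, dif_pos hjn, if_pos (List.isPrefixOf_iff_prefix.mpr hpref)]
    · rw [pvNext, dif_pos (by omega), if_neg (by
        intro hc
        exact hmin i le_rfl (by omega) (List.isPrefixOf_iff_prefix.mp hc))]
      exact ih (i + 1) (by omega) (by omega) (fun k hk => hmin k (by omega))

theorem findFrom_eq_pvNext (l pat : List Char) (i : Nat) (hi : i ≤ l.length) (hp : pat ≠ []) :
    PySem.Chars.findFrom l pat (i : Int) none =
      if pvNext l pat i = l.length then -1 else (pvNext l pat i : Int) := by
  by_cases hF : PySem.Chars.findFrom l pat (i : Int) none = -1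
  · have hinf : ¬ pat <:+: List.drop i l :=
      (PySem.Chars.findFrom_natCast_eq_neg_one_iff l pat i hi).mp hF
    have hnolater : ∀ k, i ≤ k → ¬ pat <+: l.drop k := by
      intro k hk hc
      apply hinf
      have hdd : l.drop k = (l.drop i).drop (k - i) := by
        rw [List.drop_drop]
        congr 1
        omega
      rw [hdd] at hc
      exact hc.isInfix.trans (List.drop_suffix _ _).isInfix
    rw [pvNext_eq_len l pat i hnolater, if_pos rfl, hF]
  · obtain ⟨ha, hpref, hmin⟩ := PySem.Chars.findFrom_natCast_spec l pat i hi hF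
    have heq := pvNext_eq_of l pat i (PySem.Chars.findFrom l pat (i : Int) none).toNat
      (by omega) hpref (fun k hk1 hk2 => hmin k hk1 hk2) hp
    rw [heq]
    have hlt : (PySem.Chars.findFrom l pat (i : Int) none).toNat < l.length := by
      by_contra hc
      have : l.drop (PySem.Chars.findFrom l pat (i : Int) none).toNat = [] :=
        List.drop_eq_nil_of_le (by omega)
      rw [this] at hpref
      exact hp (List.prefix_nil.mp hpref)
    rw [if_neg (by omega)]
    omega

theorem pvNext_ge (l pat : List Char) (i : Nat) (hi : i ≤ l.length) : i ≤ pvNext l pat i := by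
  suffices H : ∀ m i, l.length - i ≤ m → i ≤ l.length → i ≤ pvNext l pat i from
    H l.length i (by omega) hi
  intro m
  induction m with
  | zero => intro i hm hi'; rw [pvNext, dif_neg (by omega)]; omega
  | succ m ih =>
    intro i hm hi'
    by_cases hlt : i < l.length
    · rw [pvNext, dif_pos hlt]
      split
      · omega
      · have := ih (i + 1) (by omega) (by omega); omega
    · rw [pvNext, dif_neg hlt]; omega

theorem startswith2_iff (l : List Char) (i : Nat) (a b : Char) (h : i < l.length) :
    PySem.Chars.startswith (List.drop i l) [a, b] = true ↔
      (l.getD i ' ' = a ∧ i + 1 < l.length ∧ l.getD (i + 1) ' ' = b) := by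
  rw [PySem.Chars.startswith_iff, List.drop_eq_getElem_cons h]
  constructor
  · intro hp
    obtain ⟨h1, h2⟩ := List.cons_prefix_cons.mp hp
    have hlen : i + 1 < l.length := by
      have := h2.length_le
      simp at this
      omega
    rw [List.drop_eq_getElem_cons hlen] at h2
    obtain ⟨h3, -⟩ := List.cons_prefix_cons.mp h2
    refine ⟨?_, hlen, ?_⟩
    · rw [List.getD_eq_getElem l ' ' h]; exact h1.symm
    · rw [List.getD_eq_getElem l ' ' hlen]; exact h3.symm
  · rintro ⟨h1, h2, h3⟩
    rw [List.drop_eq_getElem_cons h2]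
    refine List.cons_prefix_cons.mpr ⟨?_, List.cons_prefix_cons.mpr ⟨?_, List.nil_prefix⟩⟩
    · rw [List.getD_eq_getElem l ' ' h] at h1; exact h1.symm
    · rw [List.getD_eq_getElem l ' ' h2] at h3; exact h3.symm

-- the main loop equivalence
theorem loop_eq (l : List Char) (i : Nat) (acc : List (List Char)) :
    pvAloop l i acc =
      pvBloop l (pvBtable l ['`']) (pvBtable l ['$', '$']) (pvBtable l ['$'])
        (pvBtable l ['\\', ')']) (pvBtable l ['\\', ']'])
        (pvBtable_tabOK l ['`']) (pvBtable_tabOK l ['$', '$']) (pvBtable_tabOK l ['$'])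
        (pvBtable_tabOK l ['\\', ')']) (pvBtable_tabOK l ['\\', ']']) i acc := by
  suffices H : ∀ m i acc, l.length - i ≤ m →
      pvAloop l i acc =
        pvBloop l (pvBtable l ['`']) (pvBtable l ['$', '$']) (pvBtable l ['$'])
          (pvBtable l ['\\', ')']) (pvBtable l ['\\', ']'])
          (pvBtable_tabOK l ['`']) (pvBtable_tabOK l ['$', '$']) (pvBtable_tabOK l ['$'])
          (pvBtable_tabOK l ['\\', ')']) (pvBtable_tabOK l ['\\', ']']) i acc from
    H l.length i acc (by omega)
  intro m
  induction m with
  | zero =>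
    intro i acc hm
    rw [pvAloop, pvBloop, dif_neg (by omega), dif_neg (by omega)]
  | succ m ih =>
    intro i acc hm
    by_cases h : i < l.length
    case neg => rw [pvAloop, pvBloop, dif_neg h, dif_neg h]
    rw [pvAloop, pvBloop, dif_pos h, dif_pos h]
    simp only
    have h1n : i + 1 ≤ l.length := by omega
    by_cases hbt : l.getD i ' ' = '`'
    · -- backtick
      rw [if_pos hbt]
      have htb := pvBtable_getD_eq l ['`'] (i + 1) h1n
      have hff := findFrom_eq_pvNext l ['`'] (i + 1) h1n (by simp)
      have hge := pvNext_ge l ['`'] (i + 1) h1n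
      rw [htb]
      by_cases hj : pvNext l ['`'] (i + 1) < l.length
      · have hF : PySem.Chars.findFrom l ['`'] ((i + 1 : Nat) : Int) none =
            ((pvNext l ['`'] (i + 1) : Nat) : Int) := by rw [hff, if_neg (by omega)]
        have hstep : pvAstep1 l i =
            (PySem.Chars.slice l (some (i : Int)) (some ((pvNext l ['`'] (i + 1) : Int) + 1)),
              pvNext l ['`'] (i + 1) + 1) := by
          unfold pvAstep1
          simp only
          rw [if_pos hbt, hF, if_pos (by omega : ((pvNext l ['`'] (i + 1) : Nat) : Int) ≠ -1)]
          simp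
        rw [hstep, dif_pos hj]
        exact ih _ _ (by omega)
      · have hF : PySem.Chars.findFrom l ['`'] ((i + 1 : Nat) : Int) none = -1 := by
          rw [hff, if_pos (by have := pvNext_le l ['`'] (i + 1); omega)]
        have hstep : pvAstep1 l i = (['`'], i + 1) := by
          unfold pvAstep1 pvAstep2 pvAstep3 pvAstep4 pvAstep5 pvAstep6
          simp only
          rw [if_pos hbt, hF, if_neg (by simp),
            if_neg (fun hc => absurd (((startswith2_iff l i '$' '$' h).mp hc).1 ▸ hbt) (by simp)),
            if_neg (by rw [hbt]; decide),
            if_neg (fun hc => absurd (((startswith2_iff l i '\\' '(' h).mp hc).1 ▸ hbt) (by simp)),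
            if_neg (fun hc => absurd (((startswith2_iff l i '\\' '[' h).mp hc).1 ▸ hbt) (by simp)),
            if_neg (by rw [hbt]; decide), hbt]
        rw [hstep, dif_neg hj]
        exact ih _ _ (by omega)
    · rw [if_neg hbt]
      by_cases hd : l.getD i ' ' = '$'
      · -- dollar
        rw [if_pos hd]
        by_cases hdd : i + 1 < l.length ∧ l.getD (i + 1) ' ' = '$'
        · rw [if_pos hdd]
          have h2n : i + 2 ≤ l.length := by omega
          have htb := pvBtable_getD_eq l ['$', '$'] (i + 2) h2n
          have hff := findFrom_eq_pvNext l ['$', '$'] (i + 2) h2n (by simp)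
          have hge := pvNext_ge l ['$', '$'] (i + 2) h2n
          have hsw : PySem.Chars.startswith (List.drop i l) ['$', '$'] = true :=
            (startswith2_iff l i '$' '$' h).mpr ⟨hd, hdd.1, hdd.2⟩
          rw [htb]
          by_cases hj : pvNext l ['$', '$'] (i + 2) < l.length
          · have hF : PySem.Chars.findFrom l ['$', '$'] ((i + 2 : Nat) : Int) none =
                ((pvNext l ['$', '$'] (i + 2) : Nat) : Int) := by rw [hff, if_neg (by omega)]
            have hstep : pvAstep1 l i =
                (PySem.Chars.slice l (some (i : Int))
                    (some ((pvNext l ['$', '$'] (i + 2) : Int) + 2)),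
                  pvNext l ['$', '$'] (i + 2) + 2) := by
              unfold pvAstep1 pvAstep2
              simp only
              rw [if_neg hbt, if_pos hsw, hF,
                if_pos (by omega : ((pvNext l ['$', '$'] (i + 2) : Nat) : Int) ≠ -1)]
              simp
            rw [hstep, dif_pos hj]
            exact ih _ _ (by omega)
          · have hF : PySem.Chars.findFrom l ['$', '$'] ((i + 2 : Nat) : Int) none = -1 := by
              rw [hff, if_pos (by have := pvNext_le l ['$', '$'] (i + 2); omega)]
            have hstep : pvAstep1 l i = (['\\', '$', '\\', '$'], i + 2) := by
              unfold pvAstep1 pvAstep2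
              simp only
              rw [if_neg hbt, if_pos hsw, hF, if_neg (by simp)]
            rw [hstep, dif_neg hj]
            exact ih _ _ (by omega)
        · rw [if_neg hdd]
          have htb := pvBtable_getD_eq l ['$'] (i + 1) h1n
          have hff := findFrom_eq_pvNext l ['$'] (i + 1) h1n (by simp)
          have hge := pvNext_ge l ['$'] (i + 1) h1n
          have hnsw : ¬ PySem.Chars.startswith (List.drop i l) ['$', '$'] = true := fun hc =>
            hdd ⟨((startswith2_iff l i '$' '$' h).mp hc).2.1,
              ((startswith2_iff l i '$' '$' h).mp hc).2.2⟩
          rw [htb]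
          by_cases hj : pvNext l ['$'] (i + 1) < l.length
          · have hF : PySem.Chars.findFrom l ['$'] ((i + 1 : Nat) : Int) none =
                ((pvNext l ['$'] (i + 1) : Nat) : Int) := by rw [hff, if_neg (by omega)]
            have hstep : pvAstep1 l i =
                (PySem.Chars.slice l (some (i : Int)) (some ((pvNext l ['$'] (i + 1) : Int) + 1)),
                  pvNext l ['$'] (i + 1) + 1) := by
              unfold pvAstep1 pvAstep2 pvAstep3
              simp only
              rw [if_neg hbt, if_neg hnsw, if_pos hd, hF,
                if_pos (by omega : ((pvNext l ['$'] (i + 1) : Nat) : Int) ≠ -1)]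
              simp
            rw [hstep, dif_pos hj]
            exact ih _ _ (by omega)
          · have hF : PySem.Chars.findFrom l ['$'] ((i + 1 : Nat) : Int) none = -1 := by
              rw [hff, if_pos (by have := pvNext_le l ['$'] (i + 1); omega)]
            have hstep : pvAstep1 l i = (['\\', '$'], i + 1) := by
              unfold pvAstep1 pvAstep2 pvAstep3
              simp only
              rw [if_neg hbt, if_neg hnsw, if_pos hd, hF, if_neg (by simp)]
            rw [hstep, dif_neg hj]
            exact ih _ _ (by omega)
      · rw [if_neg hd]
        by_cases hbs : l.getD i ' ' = '\\'
        · -- backslash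
          rw [if_pos hbs]
          have hnsw2 : ¬ PySem.Chars.startswith (List.drop i l) ['$', '$'] = true := fun hc =>
            hd ((startswith2_iff l i '$' '$' h).mp hc).1
          by_cases hpar : i + 1 < l.length ∧ l.getD (i + 1) ' ' = '('
          · have h2n : i + 2 ≤ l.length := by omega
            have htb := pvBtable_getD_eq l ['\\', ')'] (i + 2) h2n
            have hff := findFrom_eq_pvNext l ['\\', ')'] (i + 2) h2n (by simp)
            have hge := pvNext_ge l ['\\', ')'] (i + 2) h2n
            have hsw : PySem.Chars.startswith (List.drop i l) ['\\', '('] = true :=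
              (startswith2_iff l i '\\' '(' h).mpr ⟨hbs, hpar.1, hpar.2⟩
            rw [htb]
            by_cases hj : pvNext l ['\\', ')'] (i + 2) < l.length
            · rw [dif_pos ⟨hpar.1, hpar.2, hj⟩]
              have hF : PySem.Chars.findFrom l ['\\', ')'] ((i + 2 : Nat) : Int) none =
                  ((pvNext l ['\\', ')'] (i + 2) : Nat) : Int) := by rw [hff, if_neg (by omega)]
              have hstep : pvAstep1 l i =
                  (PySem.Chars.slice l (some (i : Int))
                      (some ((pvNext l ['\\', ')'] (i + 2) : Int) + 2)),
                    pvNext l ['\\', ')'] (i + 2) + 2) := by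
                unfold pvAstep1 pvAstep2 pvAstep3 pvAstep4
                simp only
                rw [if_neg hbt, if_neg hnsw2, if_neg hd, if_pos hsw, hF,
                  if_pos (by omega : ((pvNext l ['\\', ')'] (i + 2) : Nat) : Int) ≠ -1)]
                simp
              rw [hstep]
              exact ih _ _ (by omega)
            · rw [dif_neg (fun hc => absurd hc.2.2 (by omega)),
                dif_neg (fun hc => absurd (hpar.2 ▸ hc.2.1) (by decide))]
              have hF : PySem.Chars.findFrom l ['\\', ')'] ((i + 2 : Nat) : Int) none = -1 := by
                rw [hff, if_pos (by have := pvNext_le l ['\\', ')'] (i + 2); omega)]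
              have hstep : pvAstep1 l i = ("\\textbackslash{}".toList, i + 1) := by
                unfold pvAstep1 pvAstep2 pvAstep3 pvAstep4 pvAstep5 pvAstep6
                simp only
                rw [if_neg hbt, if_neg hnsw2, if_neg hd, if_pos hsw, hF, if_neg (by simp),
                  if_neg (fun hc => absurd (hpar.2 ▸ ((startswith2_iff l i '\\' '[' h).mp hc).2.2)
                    (by decide)),
                  if_pos hbs]
              rw [hstep]
              exact ih _ _ (by omega)
          · have hnswp : ¬ PySem.Chars.startswith (List.drop i l) ['\\', '('] = true := fun hc =>
              hpar ⟨((startswith2_iff l i '\\' '(' h).mp hc).2.1,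
                ((startswith2_iff l i '\\' '(' h).mp hc).2.2⟩
            rw [dif_neg (fun hc => hpar ⟨hc.1, hc.2.1⟩)]
            by_cases hbr : i + 1 < l.length ∧ l.getD (i + 1) ' ' = '['
            · have h2n : i + 2 ≤ l.length := by omega
              have htb := pvBtable_getD_eq l ['\\', ']'] (i + 2) h2n
              have hff := findFrom_eq_pvNext l ['\\', ']'] (i + 2) h2n (by simp)
              have hge := pvNext_ge l ['\\', ']'] (i + 2) h2n
              have hsw : PySem.Chars.startswith (List.drop i l) ['\\', '['] = true :=
                (startswith2_iff l i '\\' '[' h).mpr ⟨hbs, hbr.1, hbr.2⟩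
              rw [htb]
              by_cases hj : pvNext l ['\\', ']'] (i + 2) < l.length
              · rw [dif_pos ⟨hbr.1, hbr.2, hj⟩]
                have hF : PySem.Chars.findFrom l ['\\', ']'] ((i + 2 : Nat) : Int) none =
                    ((pvNext l ['\\', ']'] (i + 2) : Nat) : Int) := by rw [hff, if_neg (by omega)]
                have hstep : pvAstep1 l i =
                    (PySem.Chars.slice l (some (i : Int))
                        (some ((pvNext l ['\\', ']'] (i + 2) : Int) + 2)),
                      pvNext l ['\\', ']'] (i + 2) + 2) := by
                  unfold pvAstep1 pvAstep2 pvAstep3 pvAstep4 pvAstep5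
                  simp only
                  rw [if_neg hbt, if_neg hnsw2, if_neg hd, if_neg hnswp, if_pos hsw, hF,
                    if_pos (by omega : ((pvNext l ['\\', ']'] (i + 2) : Nat) : Int) ≠ -1)]
                  simp
                rw [hstep]
                exact ih _ _ (by omega)
              · rw [dif_neg (fun hc => absurd hc.2.2 (by omega))]
                have hF : PySem.Chars.findFrom l ['\\', ']'] ((i + 2 : Nat) : Int) none = -1 := by
                  rw [hff, if_pos (by have := pvNext_le l ['\\', ']'] (i + 2); omega)]
                have hstep : pvAstep1 l i = ("\\textbackslash{}".toList, i + 1) := by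
                  unfold pvAstep1 pvAstep2 pvAstep3 pvAstep4 pvAstep5 pvAstep6
                  simp only
                  rw [if_neg hbt, if_neg hnsw2, if_neg hd, if_neg hnswp, if_pos hsw, hF,
                    if_neg (by simp), if_pos hbs]
                rw [hstep]
                exact ih _ _ (by omega)
            · have hnswb : ¬ PySem.Chars.startswith (List.drop i l) ['\\', '['] = true := fun hc =>
                hbr ⟨((startswith2_iff l i '\\' '[' h).mp hc).2.1,
                  ((startswith2_iff l i '\\' '[' h).mp hc).2.2⟩
              rw [dif_neg (fun hc => hbr ⟨hc.1, hc.2.1⟩)]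
              have hstep : pvAstep1 l i = ("\\textbackslash{}".toList, i + 1) := by
                unfold pvAstep1 pvAstep2 pvAstep3 pvAstep4 pvAstep5 pvAstep6
                simp only
                rw [if_neg hbt, if_neg hnsw2, if_neg hd, if_neg hnswp, if_neg hnswb, if_pos hbs]
              rw [hstep]
              exact ih _ _ (by omega)
        · -- literal char
          rw [if_neg hbs]
          have hstep : pvAstep1 l i = ([l.getD i ' '], i + 1) := by
            unfold pvAstep1 pvAstep2 pvAstep3 pvAstep4 pvAstep5 pvAstep6
            simp only
            rw [if_neg hbt,
              if_neg (fun hc => hd (((startswith2_iff l i '$' '$' h).mp hc).1)),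
              if_neg hd,
              if_neg (fun hc => hbs (((startswith2_iff l i '\\' '(' h).mp hc).1)),
              if_neg (fun hc => hbs (((startswith2_iff l i '\\' '[' h).mp hc).1)),
              if_neg hbs]
          rw [hstep]
          exact ih _ _ (by omega)

-- ===== VERDICT (by name: the statement is the Claim_ definition above) =====
theorem escape_latex_line_outside_math_py_spec : Claim_equal_escape_latex_line_outside_math_py := by
  intro line _
  unfold Spec_escape_latex_line_outside_math_py
  unfold escape_latex_line_outside_math_py escape_latex_line_outside_math_py_alt
  rw [loop_eq]
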